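-- pv_equiv track=rewrite | github.com/Qingbolan/Silan-Personal-Website | silan-personal-website/silan/parsers/idea_parser.py | _classify_experiment_type
-- ===== SOURCE A (Python) =====
-- def _classify_experiment_type(filename: str) -> str:
--     """Classify experiment type"""
--     filename_lower = filename.lower()
--
--     if any(keyword in filename_lower for keyword in ['prototype', 'proof', 'poc']):
--         return 'proof_of_concept'
--     elif any(keyword in filename_lower for keyword in ['user', 'usability', 'test']):
--         return 'user_testing'
--     elif any(keyword in filename_lower for keyword in ['performance', 'benchmark']):
--         return 'performance_testing'
--     elif any(keyword in filename_lower for keyword in ['a/b', 'ab', 'variant']):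
--         return 'ab_testing'
--     else:
--         return 'general_experiment'
-- ===== SOURCE B (Python) =====
-- # Single left-to-right scan over the text: at each position, record the best
-- # (lowest) priority rank of any keyword starting there; resolve the label at the end.
-- _PRIORITY = [
--     ('prototype', 0), ('proof', 0), ('poc', 0),
--     ('user', 1), ('usability', 1), ('test', 1),
--     ('performance', 2), ('benchmark', 2),
--     ('a/b', 3), ('ab', 3), ('variant', 3),
-- ]
-- _LABELS = ['proof_of_concept', 'user_testing', 'performance_testing',
--            'ab_testing', 'general_experiment']
--
--
-- def _classify_experiment_type(filename: str) -> str: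
--     """Classify experiment type by one scan collecting the minimal matched rank."""
--     s = filename.lower()
--     best = 4
--     for i in range(len(s)):
--         for kw, rank in _PRIORITY:
--             if rank < best and s.startswith(kw, i):
--                 best = rank
--     return _LABELS[best]
-- ===== Notes on version B (the rewrite author's own statement) =====
-- stated objective: alternative
-- what changed: Instead of testing each keyword for substring containment in priority order, B makes one left-to-right scan over the lowercased text, recording at every position the minimal priority rank of any keyword starting there, and maps that minimal rank to its label at the end.
import Mathlib
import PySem

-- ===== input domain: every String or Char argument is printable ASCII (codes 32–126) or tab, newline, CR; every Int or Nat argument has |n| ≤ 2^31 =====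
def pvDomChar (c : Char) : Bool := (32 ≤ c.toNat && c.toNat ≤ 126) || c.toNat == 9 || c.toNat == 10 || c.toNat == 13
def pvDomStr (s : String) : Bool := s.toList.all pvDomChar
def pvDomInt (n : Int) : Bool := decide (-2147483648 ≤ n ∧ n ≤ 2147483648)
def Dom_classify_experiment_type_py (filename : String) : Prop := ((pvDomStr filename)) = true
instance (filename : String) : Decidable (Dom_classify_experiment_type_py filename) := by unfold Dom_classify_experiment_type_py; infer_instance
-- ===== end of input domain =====

-- B replaces A's per-keyword substring chain by ONE left-to-right scan of the text
-- collecting the minimal matched priority rank, resolved to a label at the end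
-- (objective: alternative, same cost).

-- ===== PORT A =====
def classify_experiment_type_py (filename : String) : String :=
  let filename_lower := PySem.Str.lower filename
  if ["prototype", "proof", "poc"].any (fun keyword => PySem.Str.isIn keyword filename_lower) then
    "proof_of_concept"
  else if ["user", "usability", "test"].any (fun keyword => PySem.Str.isIn keyword filename_lower) then
    "user_testing"
  else if ["performance", "benchmark"].any (fun keyword => PySem.Str.isIn keyword filename_lower) then
    "performance_testing"
  else if ["a/b", "ab", "variant"].any (fun keyword => PySem.Str.isIn keyword filename_lower) then
    "ab_testing"
  else
    "general_experiment"

-- ===== PORT B =====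
def pvPriority : List (String × Nat) :=
  [("prototype", 0), ("proof", 0), ("poc", 0),
   ("user", 1), ("usability", 1), ("test", 1),
   ("performance", 2), ("benchmark", 2),
   ("a/b", 3), ("ab", 3), ("variant", 3)]

def pvLabels : List String :=
  ["proof_of_concept", "user_testing", "performance_testing", "ab_testing", "general_experiment"]

-- inner 'for kw, rank in _PRIORITY: if rank < best and s.startswith(kw, i): best = rank'.
-- Python s.startswith(kw, i) with 0 ≤ i < len(s) is exactly kw.toList.isPrefixOf (cs.drop i)
-- (hand port, exact on that range).
def pvStep (cs : List Char) (i : Nat) (b : Nat) : Nat :=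
  pvPriority.foldl (fun b kr => if kr.2 < b ∧ kr.1.toList.isPrefixOf (cs.drop i) then kr.2 else b) b

def classify_experiment_type_py_alt (filename : String) : String :=
  let s := PySem.Str.lower filename
  let cs := s.toList
  let best := (List.range cs.length).foldl (fun b i => pvStep cs i b) 4
  pvLabels.getD best "general_experiment"

-- ===== PRECONDITION & SPEC =====
def Spec_classify_experiment_type_py (filename : String) (out : String) : Prop := out = classify_experiment_type_py_alt filename
instance (filename : String) (out : String) : Decidable (Spec_classify_experiment_type_py filename out) := by unfold Spec_classify_experiment_type_py; infer_instance

-- ===== CLAIM (what is proved, stated in full; the proofs are below) =====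
def Claim_equal_classify_experiment_type_py : Prop := ∀ (filename : String), Dom_classify_experiment_type_py filename → Spec_classify_experiment_type_py filename (classify_experiment_type_py filename)

-- ===== LEMMAS AND PROOFS =====

-- the inner fold never increases the accumulator
theorem pv_inner_le (cs : List Char) (i : Nat) :
    ∀ (l : List (String × Nat)) (b : Nat),
      l.foldl (fun b kr => if kr.2 < b ∧ kr.1.toList.isPrefixOf (cs.drop i) then kr.2 else b) b ≤ b := by
  intro l
  induction l with
  | nil => intro b; simp
  | cons x l ih =>
      intro b
      simp only [List.foldl_cons]
      refine le_trans (ih _) ?_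
      split_ifs with h
      · omega
      · exact le_rfl

-- a matched pair bounds the inner fold
theorem pv_inner_mem (cs : List Char) (i : Nat) :
    ∀ (l : List (String × Nat)) (kr : String × Nat), kr ∈ l →
      kr.1.toList.isPrefixOf (cs.drop i) = true →
      ∀ b, l.foldl (fun b kr => if kr.2 < b ∧ kr.1.toList.isPrefixOf (cs.drop i) then kr.2 else b) b ≤ kr.2 := by
  intro l
  induction l with
  | nil => intro kr h; simp at h
  | cons x l ih =>
      intro kr hmem hp b
      simp only [List.foldl_cons]
      rcases List.mem_cons.mp hmem with h | h
      · subst h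
        refine le_trans (pv_inner_le cs i l _) ?_
        split_ifs with h
        · exact le_rfl
        · simp [hp] at h; omega
      · exact ih kr h hp _

-- the inner fold's value is the start or the rank of some matched pair
theorem pv_inner_val (cs : List Char) (i : Nat) :
    ∀ (l : List (String × Nat)) (b : Nat),
      l.foldl (fun b kr => if kr.2 < b ∧ kr.1.toList.isPrefixOf (cs.drop i) then kr.2 else b) b = b ∨
      ∃ kr ∈ l, kr.1.toList.isPrefixOf (cs.drop i) = true ∧
        l.foldl (fun b kr => if kr.2 < b ∧ kr.1.toList.isPrefixOf (cs.drop i) then kr.2 else b) b = kr.2 := by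
  intro l
  induction l with
  | nil => intro b; left; rfl
  | cons x l ih =>
      intro b
      simp only [List.foldl_cons]
      rcases ih (if x.2 < b ∧ x.1.toList.isPrefixOf (cs.drop i) then x.2 else b) with h | ⟨kr, hm, hp, he⟩
      · rw [h]
        split_ifs with hc
        · exact Or.inr ⟨x, List.mem_cons_self .., hc.2, rfl⟩
        · exact Or.inl rfl
      · exact Or.inr ⟨kr, List.mem_cons_of_mem _ hm, hp, he⟩

-- outer-loop analogues
theorem pv_outer_le (cs : List Char) :
    ∀ (r : List Nat) (b : Nat), r.foldl (fun b i => pvStep cs i b) b ≤ b := by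
  intro r
  induction r with
  | nil => intro b; simp
  | cons i r ih =>
      intro b
      simp only [List.foldl_cons]
      exact le_trans (ih _) (pv_inner_le cs i pvPriority b)

theorem pv_outer_mem (cs : List Char) (kr : String × Nat) (hkr : kr ∈ pvPriority) :
    ∀ (r : List Nat) (i : Nat), i ∈ r → kr.1.toList.isPrefixOf (cs.drop i) = true →
      ∀ b, r.foldl (fun b i => pvStep cs i b) b ≤ kr.2 := by
  intro r
  induction r with
  | nil => intro i h; simp at h
  | cons j r ih =>
      intro i hmem hp b
      simp only [List.foldl_cons]
      rcases List.mem_cons.mp hmem with h | h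
      · subst h
        exact le_trans (pv_outer_le cs r _) (pv_inner_mem cs i pvPriority kr hkr hp b)
      · exact ih i h hp _

theorem pv_outer_val (cs : List Char) :
    ∀ (r : List Nat) (b : Nat),
      r.foldl (fun b i => pvStep cs i b) b = b ∨
      ∃ i ∈ r, ∃ kr ∈ pvPriority, kr.1.toList.isPrefixOf (cs.drop i) = true ∧
        r.foldl (fun b i => pvStep cs i b) b = kr.2 := by
  intro r
  induction r with
  | nil => intro b; left; rfl
  | cons j r ih =>
      intro b
      simp only [List.foldl_cons]
      rcases ih (pvStep cs j b) with h | ⟨i, hi, kr, hm, hp, he⟩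
      · rw [h]
        rcases pv_inner_val cs j pvPriority b with h2 | ⟨kr, hm, hp, he⟩
        · exact Or.inl h2
        · exact Or.inr ⟨j, List.mem_cons_self .., kr, hm, hp, he⟩
      · exact Or.inr ⟨i, List.mem_cons_of_mem _ hi, kr, hm, hp, he⟩

-- 'kw in s' (Python) for nonempty kw = kw starts at some position i < len s
theorem pv_isIn_iff (kw : String) (hk : kw.toList ≠ []) (s : String) :
    PySem.Str.isIn kw s = true ↔
      ∃ i ∈ List.range s.toList.length, kw.toList.isPrefixOf (s.toList.drop i) = true := by
  rw [PySem.Str.isIn_eq, ← PySem.Chars.exists_prefix_drop_iff_isIn]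
  constructor
  · rintro ⟨j, hj⟩
    have hjlt : j < s.toList.length := by
      by_contra h
      have : s.toList.drop j = [] := List.drop_eq_nil_of_le (by omega)
      rw [this] at hj
      exact hk (List.prefix_nil.mp hj)
    exact ⟨j, List.mem_range.mpr hjlt, List.isPrefixOf_iff_prefix.mpr hj⟩
  · rintro ⟨i, _, hp⟩
    exact ⟨i, List.isPrefixOf_iff_prefix.mp hp⟩

set_option maxHeartbeats 800000 in
-- every keyword in the table is nonempty
theorem pv_priority_ne (kr : String × Nat) (h : kr ∈ pvPriority) : kr.1.toList ≠ [] := by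
  fin_cases h <;> decide

-- a matching keyword bounds the scan's result by its rank
theorem pv_best_le (s : String) (kw : String) (r : Nat) (hkr : (kw, r) ∈ pvPriority)
    (h : PySem.Str.isIn kw s = true) :
    (List.range s.toList.length).foldl (fun b i => pvStep s.toList i b) 4 ≤ r := by
  rcases (pv_isIn_iff kw (pv_priority_ne (kw, r) hkr) s).mp h with ⟨i, hi, hp⟩
  exact pv_outer_mem s.toList (kw, r) hkr _ i hi hp 4

-- the scan's result is 4 or the rank of a keyword occurring in s
theorem pv_best_cases (s : String) :
    (List.range s.toList.length).foldl (fun b i => pvStep s.toList i b) 4 = 4 ∨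
    ∃ kr ∈ pvPriority, PySem.Str.isIn kr.1 s = true ∧
      (List.range s.toList.length).foldl (fun b i => pvStep s.toList i b) 4 = kr.2 := by
  rcases pv_outer_val s.toList (List.range s.toList.length) 4 with h | ⟨i, hi, kr, hm, hp, he⟩
  · exact Or.inl h
  · refine Or.inr ⟨kr, hm, ?_, he⟩
    exact (pv_isIn_iff kr.1 (pv_priority_ne kr hm) s).mpr ⟨i, hi, hp⟩

set_option maxHeartbeats 800000 in
-- the heart: A72s if/elif chain equals B's scan-and-resolve, for any text s
theorem pv_main (s : String) :
    (if ["prototype", "proof", "poc"].any (fun keyword => PySem.Str.isIn keyword s) then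
      "proof_of_concept"
    else if ["user", "usability", "test"].any (fun keyword => PySem.Str.isIn keyword s) then
      "user_testing"
    else if ["performance", "benchmark"].any (fun keyword => PySem.Str.isIn keyword s) then
      "performance_testing"
    else if ["a/b", "ab", "variant"].any (fun keyword => PySem.Str.isIn keyword s) then
      "ab_testing"
    else
      "general_experiment")
    = pvLabels.getD ((List.range s.toList.length).foldl (fun b i => pvStep s.toList i b) 4)
        "general_experiment" := by
  generalize hF : (List.range s.toList.length).foldl (fun b i => pvStep s.toList i b) 4 = F
  by_cases c0 : (["prototype", "proof", "poc"].any (fun keyword => PySem.Str.isIn keyword s)) = true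
  · have hle : F ≤ 0 := by
      rw [← hF]
      simp only [List.any_cons, List.any_nil, Bool.or_eq_true, Bool.or_false] at c0
      rcases c0 with h | h | h
      · exact pv_best_le s "prototype" 0 (by decide) h
      · exact pv_best_le s "proof" 0 (by decide) h
      · exact pv_best_le s "poc" 0 (by decide) h
    rw [if_pos c0, Nat.le_zero.mp hle]
    rfl
  · rw [if_neg c0]
    simp only [List.any_cons, List.any_nil, Bool.or_eq_true, Bool.or_false, not_or] at c0
    obtain ⟨n00, n01, n02⟩ := c0
    by_cases c1 : (["user", "usability", "test"].any (fun keyword => PySem.Str.isIn keyword s)) = true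
    · have hle : F ≤ 1 := by
        rw [← hF]
        simp only [List.any_cons, List.any_nil, Bool.or_eq_true, Bool.or_false] at c1
        rcases c1 with h | h | h
        · exact pv_best_le s "user" 1 (by decide) h
        · exact pv_best_le s "usability" 1 (by decide) h
        · exact pv_best_le s "test" 1 (by decide) h
      have hne : F ≠ 0 := by
        intro h0
        rcases pv_best_cases s with h | ⟨kr, hm, hin, he⟩
        · rw [hF] at h; omega
        all_goals rw [hF] at he
        · simp only [pvPriority, List.mem_cons, List.not_mem_nil, or_false] at hm
          rcases hm with rfl | rfl | rfl | rfl | rfl | rfl | rfl | rfl | rfl | rfl | rfl <;>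
            [exact absurd hin n00; exact absurd hin n01; exact absurd hin n02; omega; omega; omega; omega; omega; omega; omega; omega]
      rw [if_pos c1]
      have : F = 1 := by omega
      rw [this]
      rfl
    · rw [if_neg c1]
      simp only [List.any_cons, List.any_nil, Bool.or_eq_true, Bool.or_false, not_or] at c1
      obtain ⟨n10, n11, n12⟩ := c1
      by_cases c2 : (["performance", "benchmark"].any (fun keyword => PySem.Str.isIn keyword s)) = true
      · have hle : F ≤ 2 := by
          rw [← hF]
          simp only [List.any_cons, List.any_nil, Bool.or_eq_true, Bool.or_false] at c2
          rcases c2 with h | h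
          · exact pv_best_le s "performance" 2 (by decide) h
          · exact pv_best_le s "benchmark" 2 (by decide) h
        have hne : F = 2 := by
          rcases pv_best_cases s with h | ⟨kr, hm, hin, he⟩
          · rw [hF] at h; omega
          all_goals rw [hF] at he
          · simp only [pvPriority, List.mem_cons, List.not_mem_nil, or_false] at hm
            rcases hm with rfl | rfl | rfl | rfl | rfl | rfl | rfl | rfl | rfl | rfl | rfl <;>
              [exact absurd hin n00; exact absurd hin n01; exact absurd hin n02; exact absurd hin n10; exact absurd hin n11; exact absurd hin n12; omega; omega; omega; omega; omega]
        rw [if_pos c2, hne]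
        rfl
      · rw [if_neg c2]
        simp only [List.any_cons, List.any_nil, Bool.or_eq_true, Bool.or_false, not_or] at c2
        obtain ⟨n20, n21⟩ := c2
        by_cases c3 : (["a/b", "ab", "variant"].any (fun keyword => PySem.Str.isIn keyword s)) = true
        · have hle : F ≤ 3 := by
            rw [← hF]
            simp only [List.any_cons, List.any_nil, Bool.or_eq_true, Bool.or_false] at c3
            rcases c3 with h | h | h
            · exact pv_best_le s "a/b" 3 (by decide) h
            · exact pv_best_le s "ab" 3 (by decide) h
            · exact pv_best_le s "variant" 3 (by decide) h
          have hne : F = 3 := by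
            rcases pv_best_cases s with h | ⟨kr, hm, hin, he⟩
            · rw [hF] at h; omega
            all_goals rw [hF] at he
            · simp only [pvPriority, List.mem_cons, List.not_mem_nil, or_false] at hm
              rcases hm with rfl | rfl | rfl | rfl | rfl | rfl | rfl | rfl | rfl | rfl | rfl <;>
                [exact absurd hin n00; exact absurd hin n01; exact absurd hin n02; exact absurd hin n10; exact absurd hin n11; exact absurd hin n12; exact absurd hin n20; exact absurd hin n21; omega; omega; omega]
          rw [if_pos c3, hne]
          rfl
        · rw [if_neg c3]
          simp only [List.any_cons, List.any_nil, Bool.or_eq_true, Bool.or_false, not_or] at c3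
          obtain ⟨n30, n31, n32⟩ := c3
          have h4 : F = 4 := by
            rcases pv_best_cases s with h | ⟨kr, hm, hin, he⟩
            · rw [hF] at h; exact h
            all_goals rw [hF] at he
            · simp only [pvPriority, List.mem_cons, List.not_mem_nil, or_false] at hm
              rcases hm with rfl | rfl | rfl | rfl | rfl | rfl | rfl | rfl | rfl | rfl | rfl <;>
                [exact absurd hin n00; exact absurd hin n01; exact absurd hin n02; exact absurd hin n10; exact absurd hin n11; exact absurd hin n12; exact absurd hin n20; exact absurd hin n21; exact absurd hin n30; exact absurd hin n31; exact absurd hin n32]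
          rw [h4]
          rfl

-- ===== VERDICT (by name: the statement is the Claim_ definition above) =====
theorem classify_experiment_type_py_spec : Claim_equal_classify_experiment_type_py := by
  intro filename _
  unfold Spec_classify_experiment_type_py classify_experiment_type_py classify_experiment_type_py_alt
  exact pv_main (PySem.Str.lower filename)
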